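-- pv_equiv track=rewrite | github.com/CivicDataLab/tender-scrapers-be | app/external_services/ckan_client.py | sanitize_package_name
-- ===== SOURCE A (Python) =====
-- def sanitize_package_name(name: str) -> str:
--     """Sanitize package name according to CKAN requirements."""
--     replacements = {
--         " ": "_", "'": "", "\u2013": "-", ",": "-", ":": "--",
--         "?": "", "&amp;": "-", "(": "", ")": "", "&": "-",
--         ".": "", "\u2019": ""
--     }
--     sanitized = name.lower()
--     for old, new in replacements.items():
--         sanitized = sanitized.replace(old, new)
--     return sanitized[:100]
-- ===== SOURCE B (Python) =====
-- def sanitize_package_name(name: str) -> str: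
--     """Sanitize package name according to CKAN requirements."""
--     table = {" ": "_", "\u2013": "-", ",": "-", ":": "--",
--              "(": "", ")": "", "&": "-", ".": "", "\u2019": ""}
--     # apostrophes and question marks are dropped first (they are removed before
--     # the '&amp;' entity rule in the spec's replacement order)
--     s = [c for c in name.lower() if c not in "'?"]
--     out = []
--     i = 0
--     n = len(s)
--     while i < n:
--         if s[i] == "&" and s[i + 1:i + 5] == ["a", "m", "p", ";"]:
--             out.append("-")
--             i += 5
--         else:
--             out.append(table.get(s[i], s[i]))
--             i += 1
--     return "".join(out)[:100]
-- ===== Notes on version B (the rewrite author's own statement) =====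
-- stated objective: alternative
-- what changed: Replaces the twelve sequential full-string str.replace passes by one filter pass (dropping apostrophes and question marks) followed by a single left-to-right scan with a five-character lookahead for the HTML ampersand entity and a per-character lookup table, truncating once at the end.
import Mathlib
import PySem

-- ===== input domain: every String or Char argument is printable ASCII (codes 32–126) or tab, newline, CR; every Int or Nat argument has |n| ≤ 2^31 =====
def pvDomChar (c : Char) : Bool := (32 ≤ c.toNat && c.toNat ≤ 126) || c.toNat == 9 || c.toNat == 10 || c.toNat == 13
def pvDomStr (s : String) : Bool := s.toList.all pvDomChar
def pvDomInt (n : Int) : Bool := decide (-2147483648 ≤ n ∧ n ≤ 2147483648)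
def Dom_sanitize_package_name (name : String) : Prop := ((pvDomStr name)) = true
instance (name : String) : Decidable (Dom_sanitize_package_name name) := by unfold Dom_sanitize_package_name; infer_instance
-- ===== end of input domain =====

-- B replaces A's twelve sequential full-string replace passes by one filter pass plus a
-- single left-to-right scan with a lookahead for "&amp;" (objective: alternative single-pass algorithm).

-- ===== PORT A =====
def sanitize_package_name (name : String) : String :=
  let replacements : List (String × String) :=
    [(" ", "_"), ("'", ""), ("–", "-"), (",", "-"), (":", "--"),
     ("?", ""), ("&amp;", "-"), ("(", ""), (")", ""), ("&", "-"),
     (".", ""), ("’", "")]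
  let sanitized := PySem.Str.lower name
  let sanitized := replacements.foldl (fun s p => PySem.Str.replace s p.1 p.2) sanitized
  PySem.Str.slice sanitized none (some 100)

-- ===== PORT B =====
-- table.get(s[i], s[i]) of Source B (each value a string, here a chunk of chars)
def pvSanTable (c : Char) : List Char :=
  if c = ' ' then ['_']
  else if c = '–' then ['-']
  else if c = ',' then ['-']
  else if c = ':' then ['-', '-']
  else if c = '(' then []
  else if c = ')' then []
  else if c = '&' then ['-']
  else if c = '.' then []
  else if c = '’' then []
  else [c]

-- the while-loop of Source B: out buffer built left to right, lookahead s[i+1:i+5]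
def pvSanScan : List Char → List Char
  | [] => []
  | c :: t =>
    if c = '&' ∧ t.take 4 = ['a', 'm', 'p', ';'] then
      '-' :: pvSanScan (t.drop 4)
    else
      pvSanTable c ++ pvSanScan t
termination_by l => l.length
decreasing_by
  all_goals simp

def sanitize_package_name_alt (name : String) : String :=
  let s := (PySem.Str.lower name).toList.filter (fun c => !(c == '\'' || c == '?'))
  String.ofList (PySem.Chars.slice (pvSanScan s) none (some 100))

-- ===== PRECONDITION & SPEC =====
def Spec_sanitize_package_name (name : String) (out : String) : Prop := out = sanitize_package_name_alt name
instance (name : String) (out : String) : Decidable (Spec_sanitize_package_name name out) := by unfold Spec_sanitize_package_name; infer_instance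

-- ===== CLAIM (what is proved, stated in full; the proofs are below) =====
def Claim_equal_sanitize_package_name : Prop := ∀ (name : String), Dom_sanitize_package_name name → Spec_sanitize_package_name name (sanitize_package_name name)

-- ===== LEMMAS AND PROOFS =====

-- structural specification of PySem.Chars.replace for a nonempty pattern
def pvRepSpec (old new : List Char) : List Char → List Char
  | [] => []
  | c :: t =>
    if old.isPrefixOf (c :: t) then new ++ pvRepSpec old new (t.drop (old.length - 1))
    else c :: pvRepSpec old new t
termination_by l => l.length
decreasing_by
  all_goals simp

lemma pvReplace_go_eq (o : Char) (os new : List Char) :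
    ∀ (fuel : Nat) (l acc : List Char), l.length ≤ fuel →
      PySem.Chars.replace.go (o :: os) new fuel l acc = acc.reverse ++ pvRepSpec (o :: os) new l := by
  intro fuel
  induction fuel with
  | zero =>
    intro l acc hl
    have hln : l = [] := List.length_eq_zero_iff.mp (Nat.le_zero.mp hl)
    subst hln
    rw [PySem.Chars.replace.go]
    simp [pvRepSpec]
  | succ fuel ih =>
    intro l acc hl
    cases l with
    | nil => rw [PySem.Chars.replace.go]; simp [pvRepSpec]; omega
    | cons c t =>
      rw [PySem.Chars.replace.go]
      by_cases hp : (o :: os).isPrefixOf (c :: t)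
      · rw [if_pos hp]
        have hdrop : List.drop (o :: os).length (c :: t) = t.drop os.length := by simp
        rw [hdrop, ih _ _ (by simp at hl ⊢; omega)]
        rw [pvRepSpec, if_pos hp]
        simp
      · rw [if_neg hp, ih _ _ (by simp at hl ⊢; omega)]
        rw [pvRepSpec, if_neg hp]
        simp

lemma pvReplace_eq (o : Char) (os new l : List Char) :
    PySem.Chars.replace l (o :: os) new = pvRepSpec (o :: os) new l := by
  rw [PySem.Chars.replace]
  simp only [List.isEmpty_cons, if_false, Bool.false_eq_true]
  rw [pvReplace_go_eq o os new l.length l [] (le_refl _)]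
  simp

def pvSingle (x : Char) (w : List Char) : Char → List Char := fun c => if c = x then w else [c]

lemma pvRepSpec_single (x : Char) (w : List Char) (l : List Char) :
    pvRepSpec [x] w l = l.flatMap (pvSingle x w) := by
  induction l with
  | nil => rw [pvRepSpec]; simp
  | cons c t ih =>
    rw [pvRepSpec]
    by_cases h : c = x
    · subst h
      rw [if_pos (by simp [List.isPrefixOf])]
      simp [pvSingle, ih]
    · rw [if_neg (by simp [List.isPrefixOf]; exact fun hh => h hh.symm)]
      simp [pvSingle, h, ih]

def pvKeep (c : Char) : Bool := !(c == '\'' || c == '?')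

def pvM1 (c : Char) : List Char :=
  if c = ' ' then ['_'] else if c = '\'' then [] else if c = '–' then ['-']
  else if c = ',' then ['-'] else if c = ':' then ['-', '-'] else if c = '?' then [] else [c]

def pvM2 (c : Char) : List Char :=
  if c = '(' then [] else if c = ')' then [] else if c = '&' then ['-']
  else if c = '.' then [] else if c = '’' then [] else [c]

lemma pvPw1 (c : Char) :
    (((((((pvSingle ' ' ['_']) c).flatMap (pvSingle '\'' [])).flatMap
        (pvSingle '–' ['-'])).flatMap (pvSingle ',' ['-'])).flatMap
        (pvSingle ':' ['-', '-'])).flatMap (pvSingle '?' [])) = pvM1 c := by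
  by_cases h1 : c = ' '; · subst h1; decide
  by_cases h2 : c = '\''; · subst h2; decide
  by_cases h3 : c = '–'; · subst h3; decide
  by_cases h4 : c = ','; · subst h4; decide
  by_cases h5 : c = ':'; · subst h5; decide
  by_cases h6 : c = '?'; · subst h6; decide
  simp [pvSingle, pvM1, h1, h2, h3, h4, h5, h6]

-- the first six single-char replaces collapse to one flatMap
lemma pvStage1 (l : List Char) :
    ((((((l.flatMap (pvSingle ' ' ['_'])).flatMap (pvSingle '\'' [])).flatMap
        (pvSingle '–' ['-'])).flatMap (pvSingle ',' ['-'])).flatMap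
        (pvSingle ':' ['-', '-'])).flatMap (pvSingle '?' [])) = l.flatMap pvM1 := by
  induction l with
  | nil => simp
  | cons c t ih => simp only [List.flatMap_cons, List.flatMap_append, ih, pvPw1]

lemma pvPw2 (c : Char) :
    ((((((pvSingle '(' []) c).flatMap (pvSingle ')' [])).flatMap
        (pvSingle '&' ['-'])).flatMap (pvSingle '.' [])).flatMap (pvSingle '’' [])) = pvM2 c := by
  by_cases h1 : c = '('; · subst h1; decide
  by_cases h2 : c = ')'; · subst h2; decide
  by_cases h3 : c = '&'; · subst h3; decide
  by_cases h4 : c = '.'; · subst h4; decide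
  by_cases h5 : c = '’'; · subst h5; decide
  simp [pvSingle, pvM2, h1, h2, h3, h4, h5]

-- the last five single-char replaces collapse to one flatMap
lemma pvStage2 (l : List Char) :
    (((((l.flatMap (pvSingle '(' [])).flatMap (pvSingle ')' [])).flatMap
        (pvSingle '&' ['-'])).flatMap (pvSingle '.' [])).flatMap (pvSingle '’' [])) = l.flatMap pvM2 := by
  induction l with
  | nil => simp
  | cons c t ih => simp only [List.flatMap_cons, List.flatMap_append, ih, pvPw2]

lemma pvFilterM1 (l : List Char) : l.flatMap pvM1 = (l.filter pvKeep).flatMap pvM1 := by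
  induction l with
  | nil => simp
  | cons c t ih =>
    by_cases h : pvKeep c = true
    · simp [h, ih]
    · have hc : c = '\'' ∨ c = '?' := by
        by_cases hq : c = '\''
        · exact Or.inl hq
        · right; by_contra hr; simp [pvKeep, hq, hr] at h
      have hm : pvM1 c = [] := by rcases hc with h' | h' <;> subst h' <;> decide
      simp [h, hm, ih]

lemma pvPrefixFlatMap :
    ∀ (t p : List Char), (∀ c ∈ t, pvKeep c = true) →
      (∀ q ∈ p, q = 'a' ∨ q = 'm' ∨ q = 'p' ∨ q = ';') →
      List.isPrefixOf p (t.flatMap pvM1) = List.isPrefixOf p t := by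
  intro t
  induction t with
  | nil => intro p _ _; rfl
  | cons c t ih =>
    intro p hk hp
    cases p with
    | nil => simp [List.isPrefixOf]
    | cons q qs =>
      have hq := hp q (List.mem_cons_self)
      have hkc := hk c (List.mem_cons_self)
      have hne1 : (q == '_') = false := by rcases hq with h|h|h|h <;> subst h <;> decide
      have hne2 : (q == '-') = false := by rcases hq with h|h|h|h <;> subst h <;> decide
      by_cases h1 : c = ' '
      · subst h1
        have : (q == ' ') = false := by rcases hq with h|h|h|h <;> subst h <;> decide
        simp [pvM1, List.isPrefixOf, hne1, this]
      by_cases h2 : c = '–'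
      · subst h2
        have : (q == '–') = false := by rcases hq with h|h|h|h <;> subst h <;> decide
        simp [pvM1, List.isPrefixOf, hne2, this]
      by_cases h3 : c = ','
      · subst h3
        have : (q == ',') = false := by rcases hq with h|h|h|h <;> subst h <;> decide
        simp [pvM1, List.isPrefixOf, hne2, this]
      by_cases h4 : c = ':'
      · subst h4
        have : (q == ':') = false := by rcases hq with h|h|h|h <;> subst h <;> decide
        simp [pvM1, List.isPrefixOf, hne2, this]
      have h5 : c ≠ '\'' := by intro h; subst h; simp [pvKeep] at hkc
      have h6 : c ≠ '?' := by intro h; subst h; simp [pvKeep] at hkc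
      have hm : pvM1 c = [c] := by simp [pvM1, h1, h2, h3, h4, h5, h6]
      simp only [List.flatMap_cons, hm, List.singleton_append, List.isPrefixOf]
      rw [ih qs (fun x hx => hk x (List.mem_cons_of_mem _ hx))
          (fun x hx => hp x (List.mem_cons_of_mem _ hx))]

lemma pvTable_eq_M2 (c : Char) (h1 : c ≠ ' ') (h2 : c ≠ '–') (h3 : c ≠ ',') (h4 : c ≠ ':')
    (h5 : c ≠ '&') : pvSanTable c = pvM2 c := by
  simp [pvSanTable, pvM2, h1, h2, h3, h4, h5]

lemma pvCore : ∀ (l : List Char), (∀ c ∈ l, pvKeep c = true) →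
    (pvRepSpec ['&', 'a', 'm', 'p', ';'] ['-'] (l.flatMap pvM1)).flatMap pvM2 = pvSanScan l := by
  intro l
  induction l using pvSanScan.induct with
  | case1 => intro _; rw [pvSanScan]; simp [pvRepSpec]
  | case2 c t hg ih =>
    intro hk
    obtain ⟨hc, ht⟩ := hg
    subst hc
    have hu : t = 'a' :: 'm' :: 'p' :: ';' :: t.drop 4 := by
      conv_lhs => rw [← List.take_append_drop 4 t]
      rw [ht]
      rfl
    have hk' : ∀ c ∈ t.drop 4, pvKeep c = true :=
      fun c hcm => hk c (List.mem_cons_of_mem _ (List.mem_of_mem_drop hcm))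
    rw [hu]
    rw [pvSanScan]
    rw [if_pos (by exact ⟨rfl, rfl⟩)]
    have e1 : pvM1 '&' = ['&'] := by decide
    have e2 : pvM1 'a' = ['a'] := by decide
    have e3 : pvM1 'm' = ['m'] := by decide
    have e4 : pvM1 'p' = ['p'] := by decide
    have e5 : pvM1 ';' = [';'] := by decide
    simp only [List.flatMap_cons, e1, e2, e3, e4, e5, List.singleton_append]
    rw [pvRepSpec]
    rw [if_pos (by simp [List.isPrefixOf])]
    norm_num [List.drop_succ_cons, List.drop_zero, List.cons_append, List.nil_append,
      List.flatMap_cons]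
    rw [ih hk']
    simp [pvM2]
  | case3 c t hg ih =>
    intro hk
    have hkc := hk c (List.mem_cons_self)
    have hk' : ∀ x ∈ t, pvKeep x = true := fun x hx => hk x (List.mem_cons_of_mem _ hx)
    rw [pvSanScan, if_neg hg]
    by_cases hc : c = '&'
    · subst hc
      have ht4 : t.take 4 ≠ ['a', 'm', 'p', ';'] := fun h => hg ⟨rfl, h⟩
      have hpf : ¬ (['a', 'm', 'p', ';'] : List Char) <+: t := by
        rw [List.prefix_iff_eq_take]
        intro h
        exact ht4 (by simpa using h.symm)
      have hb : List.isPrefixOf ['a', 'm', 'p', ';'] (t.flatMap pvM1) = false := by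
        rw [pvPrefixFlatMap t _ hk' (by intro q hq; fin_cases hq <;> simp)]
        exact Bool.eq_false_iff.mpr (fun h => hpf (List.isPrefixOf_iff_prefix.mp h))
      have e1 : pvM1 '&' = ['&'] := by decide
      simp only [List.flatMap_cons, e1, List.singleton_append]
      rw [pvRepSpec, if_neg (by simp [List.isPrefixOf, hb])]
      simp only [List.flatMap_cons]
      rw [ih hk']
      simp [pvM2, pvSanTable]
    by_cases h1 : c = ' '
    · subst h1
      have e : pvM1 ' ' = ['_'] := by decide
      simp only [List.flatMap_cons, e, List.singleton_append]
      rw [pvRepSpec, if_neg (by simp [List.isPrefixOf])]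
      simp only [List.flatMap_cons]
      rw [ih hk']
      simp [pvM2, pvSanTable]
    by_cases h2 : c = '–'
    · subst h2
      have e : pvM1 '–' = ['-'] := by decide
      simp only [List.flatMap_cons, e, List.singleton_append]
      rw [pvRepSpec, if_neg (by simp [List.isPrefixOf])]
      simp only [List.flatMap_cons]
      rw [ih hk']
      simp [pvM2, pvSanTable]
    by_cases h3 : c = ','
    · subst h3
      have e : pvM1 ',' = ['-'] := by decide
      simp only [List.flatMap_cons, e, List.singleton_append]
      rw [pvRepSpec, if_neg (by simp [List.isPrefixOf])]
      simp only [List.flatMap_cons]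
      rw [ih hk']
      simp [pvM2, pvSanTable]
    by_cases h4 : c = ':'
    · subst h4
      have e : pvM1 ':' = ['-', '-'] := by decide
      simp only [List.flatMap_cons, e, List.cons_append, List.nil_append]
      rw [pvRepSpec, if_neg (by simp [List.isPrefixOf])]
      rw [pvRepSpec, if_neg (by simp [List.isPrefixOf])]
      simp only [List.flatMap_cons]
      rw [ih hk']
      simp [pvM2, pvSanTable]
    have h5 : c ≠ '\'' := by intro h; subst h; simp [pvKeep] at hkc
    have h6 : c ≠ '?' := by intro h; subst h; simp [pvKeep] at hkc
    have hm : pvM1 c = [c] := by simp [pvM1, h1, h5, h2, h3, h4, h6]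
    have hbc : (('&' : Char) == c) = false := beq_eq_false_iff_ne.mpr (Ne.symm hc)
    simp only [List.flatMap_cons, hm, List.singleton_append]
    rw [pvRepSpec, if_neg (by simp [List.isPrefixOf, hbc])]
    simp only [List.flatMap_cons]
    rw [ih hk', pvTable_eq_M2 c h1 h2 h3 h4 hc]

-- ===== VERDICT (by name: the statement is the Claim_ definition above) =====
theorem sanitize_package_name_spec : Claim_equal_sanitize_package_name := by
  intro name _
  unfold Spec_sanitize_package_name
  refine String.toList_inj.mp ?_
  unfold sanitize_package_name sanitize_package_name_alt
  simp only [List.foldl_cons, List.foldl_nil]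
  have hL : (" " : String).toList = [' '] := rfl
  have h_ : ("_" : String).toList = ['_'] := rfl
  have hq : ("'" : String).toList = ['\''] := rfl
  have he : ("" : String).toList = [] := rfl
  have hd : ("–" : String).toList = ['–'] := rfl
  have hy : ("-" : String).toList = ['-'] := rfl
  have hcm : ("," : String).toList = [','] := rfl
  have hcl : (":" : String).toList = [':'] := rfl
  have hdd : ("--" : String).toList = ['-', '-'] := rfl
  have hqm : ("?" : String).toList = ['?'] := rfl
  have ha : ("&amp;" : String).toList = ['&', 'a', 'm', 'p', ';'] := rfl
  have hop : ("(" : String).toList = ['('] := rfl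
  have hcp : (")" : String).toList = [')'] := rfl
  have ham : ("&" : String).toList = ['&'] := rfl
  have hdo : ("." : String).toList = ['.'] := rfl
  have hap : ("’" : String).toList = ['’'] := rfl
  simp only [PySem.Str.toList_slice, PySem.Str.toList_replace, PySem.Str.toList_lower,
    String.toList_ofList, hL, h_, hq, he, hd, hy, hcm, hcl, hdd, hqm, ha, hop, hcp, ham, hdo, hap]
  rw [pvReplace_eq, pvReplace_eq, pvReplace_eq, pvReplace_eq, pvReplace_eq, pvReplace_eq,
    pvReplace_eq, pvReplace_eq, pvReplace_eq, pvReplace_eq, pvReplace_eq, pvReplace_eq]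
  simp only [pvRepSpec_single]
  rw [pvStage1, pvStage2]
  have hflt : (fun c => !(c == '\'' || c == '?')) = pvKeep := rfl
  rw [pvFilterM1, hflt]
  rw [pvCore _ (fun c hcm => (List.mem_filter.mp hcm).2)]
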